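-- pv_equiv track=rewrite | github.com/B0FM2G/ECOPY_23241 | src/weekly/weekly_test_1.py | sort_list_by_divisibility
-- ===== SOURCE A (Python) =====
-- def sort_list_by_divisibility(input_list):
--     by_two=[]
--     by_five=[]
--     by_two_and_five=[]
--     by_none=[]
--     for element in input_list:
--         if element%2==0 and element%5==0:
--             by_two_and_five.append(element)
--         elif element%5==0:
--             by_five.append(element)
--         elif element%2==0:
--             by_two.append(element)
--         else:
--             by_none.append(element)
--     div={'by_two':sorted(by_two), 'by_five':sorted(by_five), 'by_two_and_five':sorted(by_two_and_five), 'by_none':sorted(by_none)}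
--     return(div)
-- ===== SOURCE B (Python) =====
-- def sort_list_by_divisibility(input_list):
--     ordered = sorted(input_list)
--     return {'by_two': [x for x in ordered if x % 2 == 0 and x % 5 != 0],
--             'by_five': [x for x in ordered if x % 5 == 0 and x % 2 != 0],
--             'by_two_and_five': [x for x in ordered if x % 10 == 0],
--             'by_none': [x for x in ordered if x % 2 != 0 and x % 5 != 0]}
-- ===== Notes on version B (the rewrite author's own statement) =====
-- stated objective: simpler
-- what changed: B replaces the accumulator loop plus four per-bucket sorted() calls with one global sort followed by four independent list comprehensions using decoupled divisibility tests (x%10==0 for both, etc.); buckets inherit sortedness from the global order.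
import Mathlib
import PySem

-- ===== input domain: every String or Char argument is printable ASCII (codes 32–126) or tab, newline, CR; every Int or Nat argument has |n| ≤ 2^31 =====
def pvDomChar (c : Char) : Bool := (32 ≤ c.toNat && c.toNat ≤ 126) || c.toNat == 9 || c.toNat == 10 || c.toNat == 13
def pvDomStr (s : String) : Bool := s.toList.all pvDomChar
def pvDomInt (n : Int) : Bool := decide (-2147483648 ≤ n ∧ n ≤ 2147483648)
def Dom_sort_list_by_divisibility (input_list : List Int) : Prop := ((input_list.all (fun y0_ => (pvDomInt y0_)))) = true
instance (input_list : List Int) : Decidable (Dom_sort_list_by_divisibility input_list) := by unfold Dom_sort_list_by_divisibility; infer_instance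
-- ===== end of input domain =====

-- B replaces A's accumulator loop and four per-bucket sorts with one global sort plus four independent filters (decoupled divisibility tests); same return value, simpler decomposition.


-- ===== PORT A =====
-- the for-loop of A: four append-accumulators, branches in A's order
def pvLoopA (st : List Int × List Int × List Int × List Int) (e : Int) :
    List Int × List Int × List Int × List Int :=
  let (two, five, tf, non) := st
  if PySem.Int.mod e 2 = 0 ∧ PySem.Int.mod e 5 = 0 then (two, five, tf ++ [e], non)
  else if PySem.Int.mod e 5 = 0 then (two, five ++ [e], tf, non)
  else if PySem.Int.mod e 2 = 0 then (two ++ [e], five, tf, non)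
  else (two, five, tf, non ++ [e])

def sort_list_by_divisibility (input_list : List Int) : List (String × List Int) :=
  let (two, five, tf, non) := input_list.foldl pvLoopA ([], [], [], [])
  [("by_two", PySem.List.sorted two (fun x => x) false),
   ("by_five", PySem.List.sorted five (fun x => x) false),
   ("by_two_and_five", PySem.List.sorted tf (fun x => x) false),
   ("by_none", PySem.List.sorted non (fun x => x) false)]

-- ===== PORT B =====
-- Source B: sort once, then four independent list comprehensions (filters) over the sorted list
def sort_list_by_divisibility_alt (input_list : List Int) : List (String × List Int) :=
  let ordered := PySem.List.sorted input_list (fun x => x) false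
  [("by_two", ordered.filter (fun x => PySem.Int.mod x 2 == 0 && !(PySem.Int.mod x 5 == 0))),
   ("by_five", ordered.filter (fun x => PySem.Int.mod x 5 == 0 && !(PySem.Int.mod x 2 == 0))),
   ("by_two_and_five", ordered.filter (fun x => PySem.Int.mod x 10 == 0)),
   ("by_none", ordered.filter (fun x => !(PySem.Int.mod x 2 == 0) && !(PySem.Int.mod x 5 == 0)))]

-- ===== PRECONDITION & SPEC =====
def Spec_sort_list_by_divisibility (input_list : List Int) (out : List (String × List Int)) : Prop := out = sort_list_by_divisibility_alt input_list
instance (input_list : List Int) (out : List (String × List Int)) : Decidable (Spec_sort_list_by_divisibility input_list out) := by unfold Spec_sort_list_by_divisibility; infer_instance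

-- ===== CLAIM =====
def Claim_equal_sort_list_by_divisibility : Prop := ∀ (input_list : List Int), Dom_sort_list_by_divisibility input_list → Spec_sort_list_by_divisibility input_list (sort_list_by_divisibility input_list)

-- ===== LEMMAS AND PROOFS =====

-- the bucket predicates A's if/elif chain realises
def pTF (e : Int) : Bool := decide (PySem.Int.mod e 2 = 0 ∧ PySem.Int.mod e 5 = 0)
def pFive (e : Int) : Bool := !pTF e && decide (PySem.Int.mod e 5 = 0)
def pTwo (e : Int) : Bool := !pTF e && !decide (PySem.Int.mod e 5 = 0) && decide (PySem.Int.mod e 2 = 0)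
def pNone (e : Int) : Bool := !pTF e && !decide (PySem.Int.mod e 5 = 0) && !decide (PySem.Int.mod e 2 = 0)

theorem loopA_filter (xs : List Int) (a b c d : List Int) :
    xs.foldl pvLoopA (a, b, c, d) =
      (a ++ xs.filter pTwo, b ++ xs.filter pFive, c ++ xs.filter pTF, d ++ xs.filter pNone) := by
  induction xs generalizing a b c d with
  | nil => simp
  | cons x xs ih =>
    simp only [List.foldl_cons, pvLoopA, PySem.Int.mod_eq_zero_iff_dvd]
    by_cases h1 : (2:Int) ∣ x ∧ (5:Int) ∣ x
    · simp [h1, ih, pTwo, pFive, pTF, pNone, List.filter_cons, PySem.Int.mod_eq_zero_iff_dvd]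
    · by_cases h2 : (5:Int) ∣ x
      · have h3 : ¬ (2:Int) ∣ x := fun h => h1 ⟨h, h2⟩
        simp [h1, h2, h3, ih, pTwo, pFive, pTF, pNone, List.filter_cons, PySem.Int.mod_eq_zero_iff_dvd]
      · by_cases h3 : (2:Int) ∣ x
        · simp [h1, h2, h3, ih, pTwo, pFive, pTF, pNone, List.filter_cons, PySem.Int.mod_eq_zero_iff_dvd]
        · simp [h1, h2, h3, ih, pTwo, pFive, pTF, pNone, List.filter_cons, PySem.Int.mod_eq_zero_iff_dvd]

-- sorting then filtering = filtering then sorting (identity key, Int)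
theorem sorted_filter_comm (p : Int → Bool) (xs : List Int) :
    PySem.List.sorted (xs.filter p) (fun x => x) false =
      (PySem.List.sorted xs (fun x => x) false).filter p := by
  apply PySem.List.sorted_id_eq_of_perm_of_pairwise
  · exact ((PySem.List.sorted_perm xs (fun x => x) false).filter p)
  · exact (PySem.List.sorted_pairwise xs (fun x => x)).filter p

-- A's chained predicates agree pointwise with B's decoupled divisibility tests
theorem pTwo_eq (e : Int) : pTwo e = (PySem.Int.mod e 2 == 0 && !(PySem.Int.mod e 5 == 0)) := by
  simp [pTwo, pTF, PySem.Int.mod_eq_zero_iff_dvd]; by_cases h2 : (2:Int) ∣ e <;> by_cases h5 : (5:Int) ∣ e <;> simp [h2, h5]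

theorem pFive_eq (e : Int) : pFive e = (PySem.Int.mod e 5 == 0 && !(PySem.Int.mod e 2 == 0)) := by
  simp [pFive, pTF, PySem.Int.mod_eq_zero_iff_dvd]; by_cases h2 : (2:Int) ∣ e <;> by_cases h5 : (5:Int) ∣ e <;> simp [h2, h5]

theorem pTF_eq (e : Int) : pTF e = (PySem.Int.mod e 10 == 0) := by
  have h : ((2:Int) ∣ e ∧ (5:Int) ∣ e) ↔ (10:Int) ∣ e := by
    constructor
    · rintro ⟨h2, h5⟩; omega
    · intro h; exact ⟨dvd_trans ⟨5, by ring⟩ h, dvd_trans ⟨2, by ring⟩ h⟩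
  have h10 : (PySem.Int.mod e 10 == 0) = decide ((10:Int) ∣ e) := by
    by_cases hd : (10:Int) ∣ e <;>
      simp [hd, beq_iff_eq, PySem.Int.mod_eq_zero_iff_dvd]
  rw [h10]
  simp [pTF, PySem.Int.mod_eq_zero_iff_dvd, h]

theorem pNone_eq (e : Int) : pNone e = (!(PySem.Int.mod e 2 == 0) && !(PySem.Int.mod e 5 == 0)) := by
  simp [pNone, pTF, PySem.Int.mod_eq_zero_iff_dvd]; by_cases h2 : (2:Int) ∣ e <;> by_cases h5 : (5:Int) ∣ e <;> simp [h2, h5]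

-- ===== VERDICT =====
theorem sort_list_by_divisibility_spec : Claim_equal_sort_list_by_divisibility := by
  intro xs _
  unfold Spec_sort_list_by_divisibility sort_list_by_divisibility sort_list_by_divisibility_alt
  simp only [loopA_filter, List.nil_append]
  have e2 : pTwo = (fun x => PySem.Int.mod x 2 == 0 && !(PySem.Int.mod x 5 == 0)) := funext pTwo_eq
  have e5 : pFive = (fun x => PySem.Int.mod x 5 == 0 && !(PySem.Int.mod x 2 == 0)) := funext pFive_eq
  have etf : pTF = (fun x => PySem.Int.mod x 10 == 0) := funext pTF_eq
  have en : pNone = (fun x => !(PySem.Int.mod x 2 == 0) && !(PySem.Int.mod x 5 == 0)) := funext pNone_eq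
  simp [sorted_filter_comm, e2, e5, etf, en]
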